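-- pv_equiv track=rewrite | github.com/sk8wt/practice | AdventCode/2inventory.py | hash_letters
-- ===== SOURCE A (Python) =====
-- def hash_letters(ID):
--     letter_dictionary = {}
--     num_twos = 0
--     num_threes = 0
--
--     for letter in ID:
--         if letter in letter_dictionary:
--             letter_dictionary[letter] += 1
--         else:
--             letter_dictionary[letter] = 1
--
--     for letter_key in letter_dictionary:
--         if letter_dictionary[letter_key] == 2 and num_twos < 1:
--             num_twos = 1
--         if letter_dictionary[letter_key] >= 3 and num_threes < 1:
--             num_threes = 1
--     return num_twos, num_threes
-- ===== SOURCE B (Python) =====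
-- def hash_letters(ID):
--     num_twos = 0
--     num_threes = 0
--     prev = None
--     run = 0
--     for ch in sorted(ID):
--         if ch == prev:
--             run += 1
--         else:
--             if run == 2:
--                 num_twos = 1
--             if run >= 3:
--                 num_threes = 1
--             prev = ch
--             run = 1
--     if run == 2:
--         num_twos = 1
--     if run >= 3:
--         num_threes = 1
--     return num_twos, num_threes
-- ===== Notes on version B (the rewrite author's own statement) =====
-- stated objective: alternative
-- what changed: B replaces A's counting dictionary and flag loop over its keys by sorting the characters and making one run-length scan over the sorted sequence, setting the flags when a run of length exactly 2 / at least 3 ends.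
import Mathlib
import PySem

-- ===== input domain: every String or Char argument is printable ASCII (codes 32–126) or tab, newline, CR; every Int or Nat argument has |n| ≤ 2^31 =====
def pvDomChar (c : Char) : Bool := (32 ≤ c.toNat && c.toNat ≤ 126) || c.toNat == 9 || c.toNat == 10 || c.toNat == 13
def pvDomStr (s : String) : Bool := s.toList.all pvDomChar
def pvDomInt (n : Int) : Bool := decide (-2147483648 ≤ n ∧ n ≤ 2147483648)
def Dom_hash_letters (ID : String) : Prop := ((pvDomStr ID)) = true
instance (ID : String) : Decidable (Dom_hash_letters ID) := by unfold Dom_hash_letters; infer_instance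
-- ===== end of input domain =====

set_option maxRecDepth 100000


-- B replaces A's counting dictionary and its flag loop over the keys by a sort followed by a
-- single run-length scan over the sorted characters (objective: alternative algorithm; not faster).

-- ===== PORT A =====
def hash_letters (ID : String) : Int × Int :=
  let letter_dictionary : PySem.Dict Char Int :=
    ID.toList.foldl
      (fun d letter =>
        if d.contains letter then d.insert letter (d.getD letter 0 + 1)
        else d.insert letter 1)
      PySem.Dict.empty
  letter_dictionary.keys.foldl
    (fun (acc : Int × Int) letter_key =>
      ((if letter_dictionary.getD letter_key 0 == 2 && decide (acc.1 < 1) then 1 else acc.1),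
       (if decide (3 ≤ letter_dictionary.getD letter_key 0) && decide (acc.2 < 1) then 1 else acc.2)))
    (0, 0)

-- ===== PORT B =====
-- loop body of Source B: state (prev, run, num_twos, num_threes)
def pvAltStep (st : Option Char × Int × Int × Int) (ch : Char) : Option Char × Int × Int × Int :=
  match st with
  | (prev, run, t, th) =>
    if some ch == prev then (prev, run + 1, t, th)
    else (some ch, 1, (if run == 2 then 1 else t), (if decide (3 ≤ run) then 1 else th))

-- the trailing 'if run == 2 / if run >= 3' after the loop
def pvAltFin (st : Option Char × Int × Int × Int) : Int × Int :=
  match st with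
  | (_, run, t, th) => ((if run == 2 then 1 else t), (if decide (3 ≤ run) then 1 else th))

def hash_letters_alt (ID : String) : Int × Int :=
  pvAltFin ((PySem.List.sorted ID.toList (fun c => c) false).foldl pvAltStep (none, 0, 0, 0))

-- ===== PRECONDITION & SPEC =====
def Spec_hash_letters (ID : String) (out : Int × Int) : Prop := out = hash_letters_alt ID
instance (ID : String) (out : Int × Int) : Decidable (Spec_hash_letters ID out) := by unfold Spec_hash_letters; infer_instance

-- ===== CLAIM (what is proved, stated in full; the proofs are below) =====
def Claim_equal_hash_letters : Prop := ∀ (ID : String), Dom_hash_letters ID → Spec_hash_letters ID (hash_letters ID)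

-- ===== LEMMAS AND PROOFS =====

-- A's counting loop ('if letter in d: d[letter] += 1 else: d[letter] = 1') is the counter fold.
theorem pv_counting_loop (chars : List Char) :
    chars.foldl
      (fun (d : PySem.Dict Char Int) letter =>
        if d.contains letter then d.insert letter (d.getD letter 0 + 1)
        else d.insert letter 1)
      PySem.Dict.empty = PySem.Dict.counter chars := by
  have hstep : (fun (d : PySem.Dict Char Int) letter =>
        if d.contains letter then d.insert letter (d.getD letter 0 + 1)
        else d.insert letter 1)
      = (fun (d : PySem.Dict Char Int) letter => d.insert letter (d.getD letter 0 + 1)) := by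
    funext d c
    by_cases h : d.contains c = true
    · simp [h]
    · rw [PySem.Dict.getD_of_not_contains d 0 (by simpa using h)]; simp [h]
  rw [hstep, PySem.Dict.foldl_insert_getD_add_one_eq_counter]

-- A's flag loop sets each 0/1 flag iff the corresponding predicate holds somewhere in the list.
theorem pv_flag_loop (p q : Char → Bool) (ks : List Char) (a b : Int) :
    ks.foldl
      (fun (acc : Int × Int) k =>
        ((if p k && decide (acc.1 < 1) then 1 else acc.1),
         (if q k && decide (acc.2 < 1) then 1 else acc.2)))
      (a, b)
    = ((if a < 1 ∧ ks.any p then 1 else a),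
       (if b < 1 ∧ ks.any q then 1 else b)) := by
  induction ks generalizing a b with
  | nil => simp
  | cons k ks ih =>
    rw [List.foldl_cons, ih]
    by_cases hp : p k <;> by_cases hq : q k <;>
      by_cases ha : a < 1 <;> by_cases hb : b < 1 <;>
        simp [hp, hq, ha, hb]

-- '∃ c ∈ b::s with c ≠ a and P(count in b::s)' splits into the head run and the tail, when a ∉ s.
theorem pv_exists_cons_count {P : Nat → Prop} (b a : Char) (s : List Char)
    (hab : b ≠ a) (ha : a ∉ s) :
    ((∃ c, c ∈ b :: s ∧ c ≠ a ∧ P ((b :: s).count c)) ↔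
      (P (s.count b + 1) ∨ ∃ c, c ∈ s ∧ c ≠ b ∧ P (s.count c))) := by
  constructor
  · rintro ⟨c, hc, hca, hp⟩
    rcases List.mem_cons.mp hc with h | h
    · subst h; left; simpa [List.count_cons_self] using hp
    · by_cases hcb : c = b
      · subst hcb; left; simpa [List.count_cons_self] using hp
      · right; exact ⟨c, h, hcb, by simpa [List.count_cons_of_ne (Ne.symm hcb)] using hp⟩
  · rintro (hp | ⟨c, hc, hcb, hp⟩)
    · exact ⟨b, List.mem_cons_self, hab, by simpa [List.count_cons_self] using hp⟩
    · exact ⟨c, List.mem_cons_of_mem _ hc, fun h => ha (h ▸ hc),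
        by simpa [List.count_cons_of_ne (Ne.symm hcb)] using hp⟩

-- same split without the 'c ≠ a' restriction (used for the very first run)
theorem pv_exists_cons_count' {P : Nat → Prop} (b : Char) (s : List Char) :
    ((∃ c, c ∈ b :: s ∧ P ((b :: s).count c)) ↔
      (P (s.count b + 1) ∨ ∃ c, c ∈ s ∧ c ≠ b ∧ P (s.count c))) := by
  constructor
  · rintro ⟨c, hc, hp⟩
    rcases List.mem_cons.mp hc with h | h
    · subst h; left; simpa [List.count_cons_self] using hp
    · by_cases hcb : c = b
      · subst hcb; left; simpa [List.count_cons_self] using hp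
      · right; exact ⟨c, h, hcb, by simpa [List.count_cons_of_ne (Ne.symm hcb)] using hp⟩
  · rintro (hp | ⟨c, hc, hcb, hp⟩)
    · exact ⟨b, List.mem_cons_self, by simpa [List.count_cons_self] using hp⟩
    · exact ⟨c, List.mem_cons_of_mem _ hc, by simpa [List.count_cons_of_ne (Ne.symm hcb)] using hp⟩

-- when the head equals the excluded letter a, it contributes nothing to the '∃ c ≠ a' condition
theorem pv_exists_cons_self_count {P : Nat → Prop} (a : Char) (s : List Char) :
    ((∃ c, c ∈ a :: s ∧ c ≠ a ∧ P ((a :: s).count c)) ↔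
      (∃ c, c ∈ s ∧ c ≠ a ∧ P (s.count c))) := by
  constructor
  · rintro ⟨c, hc, hca, hp⟩
    rcases List.mem_cons.mp hc with h | h
    · exact absurd h hca
    · exact ⟨c, h, hca, by simpa [List.count_cons_of_ne (Ne.symm hca)] using hp⟩
  · rintro ⟨c, hc, hca, hp⟩
    exact ⟨c, List.mem_cons_of_mem _ hc, hca,
      by simpa [List.count_cons_of_ne (Ne.symm hca)] using hp⟩

-- nested flag ifs collapse into one disjunctive if
theorem pv_if_collapse2 (P : Prop) [Decidable P] (r t : Int) :
    (if P then (1 : Int) else if r == 2 then 1 else t) = if r = 2 ∨ P then 1 else t := by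
  by_cases h : P <;> by_cases h2 : r = 2 <;> simp [h, h2]

theorem pv_if_collapse3 (P : Prop) [Decidable P] (r t : Int) :
    (if P then (1 : Int) else if decide (3 ≤ r) then 1 else t) = if 3 ≤ r ∨ P then 1 else t := by
  by_cases h : P <;> by_cases h2 : 3 ≤ r <;> simp [h, h2]

-- Run-length scan invariant: on a sorted tail s all of whose elements are ≥ the current letter a,
-- with current run length r, B's loop + final check sets each flag iff the completed current run
-- (r plus the remaining a's) or some other letter's count satisfies the predicate.
theorem pv_scan_run (s : List Char) (hs : s.Pairwise (· ≤ ·)) (a : Char)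
    (hle : ∀ b ∈ s, a ≤ b) (r t th : Int) :
    pvAltFin (s.foldl pvAltStep (some a, r, t, th)) =
      ((if (r + (s.count a : Int) = 2) ∨ (∃ c, c ∈ s ∧ c ≠ a ∧ (s.count c) = 2) then 1 else t),
       (if (3 ≤ r + (s.count a : Int)) ∨ (∃ c, c ∈ s ∧ c ≠ a ∧ 3 ≤ (s.count c)) then 1 else th)) := by
  induction s generalizing a r t th with
  | nil =>
    simp only [List.foldl_nil, pvAltFin, List.count_nil, List.not_mem_nil, false_and,
      exists_false, or_false, Nat.cast_zero, add_zero, Prod.mk.injEq]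
    refine ⟨?_, ?_⟩
    · by_cases h : r = 2 <;> simp [h]
    · by_cases h : 3 ≤ r <;> simp [h]
  | cons b s ih =>
    have hs' := (List.pairwise_cons.mp hs).2
    have hb : ∀ c ∈ s, b ≤ c := (List.pairwise_cons.mp hs).1
    by_cases hba : b = a
    · subst hba
      rw [List.foldl_cons]
      have hstep : pvAltStep (some b, r, t, th) b = (some b, r + 1, t, th) := by
        simp [pvAltStep]
      rw [hstep, ih hs' b hb (r + 1) t th]
      have hcnt : ((b :: s).count b : Int) = (s.count b : Int) + 1 := by
        rw [List.count_cons_self]; push_cast; ring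
      refine Prod.ext (if_congr ?_ rfl rfl) (if_congr ?_ rfl rfl)
      · rw [hcnt, pv_exists_cons_self_count (P := fun n => n = 2) b s]
        constructor <;> rintro (h | h)
        · left; omega
        · right; exact h
        · left; omega
        · right; exact h
      · rw [hcnt, pv_exists_cons_self_count (P := fun n => 3 ≤ n) b s]
        constructor <;> rintro (h | h)
        · left; omega
        · right; exact h
        · left; omega
        · right; exact h
    · have hab : a ≠ b := fun h => hba h.symm
      have hanotin : a ∉ s := fun hmem =>
        hba (le_antisymm (hb a hmem) (hle b List.mem_cons_self))
      rw [List.foldl_cons]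
      have hstep : pvAltStep (some a, r, t, th) b =
          (some b, 1, (if r == 2 then 1 else t), (if decide (3 ≤ r) then 1 else th)) := by
        simp [pvAltStep, Ne.symm hab]
      rw [hstep, ih hs' b hb 1 _ _]
      have hca : (b :: s).count a = 0 := by
        simp [List.count_eq_zero, List.mem_cons, hab, hanotin]
      rw [pv_if_collapse2, pv_if_collapse3]
      refine Prod.ext (if_congr ?_ rfl rfl) (if_congr ?_ rfl rfl)
      · rw [hca, pv_exists_cons_count (P := fun n => n = 2) b a s (Ne.symm hab) hanotin]
        constructor <;> rintro (h | h | h)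
        · left; omega
        · right; left; omega
        · right; right; exact h
        · left; omega
        · right; left; omega
        · right; right; exact h
      · rw [hca, pv_exists_cons_count (P := fun n => 3 ≤ n) b a s (Ne.symm hab) hanotin]
        constructor <;> rintro (h | h | h)
        · left; omega
        · right; left; omega
        · right; right; exact h
        · left; omega
        · right; left; omega
        · right; right; exact h

-- Fresh start of the scan: on any sorted list the flags record exactly whether some
-- character's count is 2 / at least 3.
theorem pv_scan_fresh (s : List Char) (hs : s.Pairwise (· ≤ ·)) :
    pvAltFin (s.foldl pvAltStep (none, 0, 0, 0)) =
      ((if ∃ c, c ∈ s ∧ (s.count c) = 2 then 1 else 0),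
       (if ∃ c, c ∈ s ∧ 3 ≤ (s.count c) then 1 else 0)) := by
  cases s with
  | nil => simp [pvAltFin]
  | cons b s =>
    have hs' := (List.pairwise_cons.mp hs).2
    have hb : ∀ c ∈ s, b ≤ c := (List.pairwise_cons.mp hs).1
    rw [List.foldl_cons]
    have hstep : pvAltStep (none, 0, 0, 0) b = (some b, 1, 0, 0) := by
      simp [pvAltStep]
    rw [hstep, pv_scan_run s hs' b hb 1 0 0]
    have h1 : (∃ c, c ∈ b :: s ∧ (b :: s).count c = 2) ↔
        ((1 : Int) + (s.count b : Int) = 2 ∨ ∃ c, c ∈ s ∧ c ≠ b ∧ s.count c = 2) := by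
      rw [pv_exists_cons_count' (P := fun n => n = 2) b s]
      constructor <;> rintro (h | h)
      · left; omega
      · right; exact h
      · left; omega
      · right; exact h
    have h2 : (∃ c, c ∈ b :: s ∧ 3 ≤ (b :: s).count c) ↔
        ((3 : Int) ≤ 1 + (s.count b : Int) ∨ ∃ c, c ∈ s ∧ c ≠ b ∧ 3 ≤ s.count c) := by
      rw [pv_exists_cons_count' (P := fun n => 3 ≤ n) b s]
      constructor <;> rintro (h | h)
      · left; omega
      · right; exact h
      · left; omega
      · right; exact h
    simp only [h1, h2]

-- ===== VERDICT (by name: the statement is the Claim_ definition above) =====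
theorem hash_letters_spec : Claim_equal_hash_letters := by
  intro ID _
  show hash_letters ID = hash_letters_alt ID
  rw [hash_letters, hash_letters_alt, pv_counting_loop, pv_flag_loop,
      pv_scan_fresh _ (by simpa using PySem.List.sorted_pairwise ID.toList (fun c => c))]
  have hperm : (PySem.List.sorted ID.toList (fun c => c) false).Perm ID.toList :=
    PySem.List.sorted_perm ID.toList (fun c => c) false
  have h1 : ((0 : Int) < 1 ∧ (PySem.Dict.counter ID.toList).keys.any
        (fun k => (PySem.Dict.counter ID.toList).getD k 0 == 2) = true) ↔
      (∃ c, c ∈ PySem.List.sorted ID.toList (fun c => c) false ∧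
        (PySem.List.sorted ID.toList (fun c => c) false).count c = 2) := by
    constructor
    · rintro ⟨-, h⟩
      rw [PySem.Dict.keys_counter, List.any_eq_true] at h
      obtain ⟨c, hc, hp⟩ := h
      rw [PySem.Set.mem_ofList] at hc
      refine ⟨c, (PySem.List.mem_sorted ID.toList (fun c => c) false c).mpr hc, ?_⟩
      have h2 : ((ID.toList.count c : Int)) = 2 := by
        simpa [PySem.Dict.getD_counter] using hp
      rw [hperm.count_eq]; omega
    · rintro ⟨c, hc, hcount⟩
      refine ⟨by norm_num, ?_⟩
      rw [PySem.Dict.keys_counter, List.any_eq_true]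
      refine ⟨c, ?_, ?_⟩
      · rw [PySem.Set.mem_ofList]
        exact (PySem.List.mem_sorted ID.toList (fun c => c) false c).mp hc
      · rw [hperm.count_eq] at hcount
        simp [PySem.Dict.getD_counter, hcount]
  have h3 : ((0 : Int) < 1 ∧ (PySem.Dict.counter ID.toList).keys.any
        (fun k => decide (3 ≤ (PySem.Dict.counter ID.toList).getD k 0)) = true) ↔
      (∃ c, c ∈ PySem.List.sorted ID.toList (fun c => c) false ∧
        3 ≤ (PySem.List.sorted ID.toList (fun c => c) false).count c) := by
    constructor
    · rintro ⟨-, h⟩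
      rw [PySem.Dict.keys_counter, List.any_eq_true] at h
      obtain ⟨c, hc, hp⟩ := h
      rw [PySem.Set.mem_ofList] at hc
      refine ⟨c, (PySem.List.mem_sorted ID.toList (fun c => c) false c).mpr hc, ?_⟩
      have h2 : (3 : Int) ≤ (ID.toList.count c : Int) := by
        simpa [PySem.Dict.getD_counter] using hp
      rw [hperm.count_eq]; omega
    · rintro ⟨c, hc, hcount⟩
      refine ⟨by norm_num, ?_⟩
      rw [PySem.Dict.keys_counter, List.any_eq_true]
      refine ⟨c, ?_, ?_⟩
      · rw [PySem.Set.mem_ofList]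
        exact (PySem.List.mem_sorted ID.toList (fun c => c) false c).mp hc
      · rw [hperm.count_eq] at hcount
        simp [PySem.Dict.getD_counter]
        omega
  simp only [h1, h3]
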